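-- pv_equiv track=rewrite | github.com/UKyKORA/IGV | src/process_lidar.py | segment_points
-- ===== SOURCE A (Python) =====
-- def segment_points(cloud):
--     # Separate point cloud into segments of consecutive readings
--     # Stored as list of pairs (start index, stop index)
--     obstacle_list = []
--     start_point = 0
--     stop_point = 0
--
--     for point in range(len(cloud)):
--         # if the first point in the scan has a range reading OR the current point has a reading and the previous does not
--         if ((point == 0) and cloud[point]) or ((not cloud[point-1]) and cloud[point]):
--             # start the segment
--             start_point = point
--         # if the last point in the scan has a range reading
--         if ((point == len(cloud)-1) and cloud[point]):
--             #end the segment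
--             stop_point = point
--             obstacle_list.append((start_point, stop_point))
--             break
--         # the current point has a reading and the next does not
--         elif  (cloud[point] and (not cloud[point+1])):
--             #end the segment
--             stop_point = point
--             obstacle_list.append((start_point, stop_point))
--         # add the obstacle start-stop pair to the list
--     return obstacle_list
-- ===== SOURCE B (Python) =====
-- def segment_points(cloud):
--     # Run-consuming scan: advance one pointer; when a nonzero reading is hit,
--     # consume the whole run of nonzero readings and emit (start, stop) at once.
--     obstacle_list = []
--     n = len(cloud)
--     i = 0
--     while i < n:
--         if not cloud[i]:
--             i += 1
--             continue
--         j = i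
--         while j + 1 < n and cloud[j + 1]:
--             j += 1
--         obstacle_list.append((i, j))
--         i = j + 1
--     return obstacle_list
-- ===== Notes on version B (the rewrite author's own statement) =====
-- stated objective: alternative
-- what changed: Replaces A's per-point transition detection (neighbour tests with maintained start/stop state and a break) by a run-consuming scan: an inner loop swallows each run of nonzero readings and emits its (start, stop) pair directly.
import Mathlib
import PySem

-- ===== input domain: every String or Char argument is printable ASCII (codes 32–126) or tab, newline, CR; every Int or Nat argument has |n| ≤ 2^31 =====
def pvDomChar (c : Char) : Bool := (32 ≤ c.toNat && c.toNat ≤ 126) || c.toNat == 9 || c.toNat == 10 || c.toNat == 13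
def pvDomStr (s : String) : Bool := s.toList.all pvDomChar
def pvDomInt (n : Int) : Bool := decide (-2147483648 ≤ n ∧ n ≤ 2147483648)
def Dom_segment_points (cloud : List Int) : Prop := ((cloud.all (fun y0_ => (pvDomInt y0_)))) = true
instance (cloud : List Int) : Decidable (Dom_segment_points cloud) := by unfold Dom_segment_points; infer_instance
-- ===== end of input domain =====

-- B replaces A's per-point transition detection (neighbour tests, maintained start/stop
-- state, break) by a run-consuming scan that swallows each run of nonzero readings and
-- emits its (start, stop) pair at once; same O(n) cost, different decomposition.

-- ===== PORT A =====
-- cloud[i] (all subscripts both programs evaluate are in range, so the default is never used)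
def pvG (cloud : List Int) (i : Int) : Int := PySem.List.pyGetD cloud i 0

-- the `for point in range(len(cloud))` loop with its break; fuel = remaining iterations
def pvALoop (cloud : List Int) (n : Int) : Nat → Int → Int → List (Int × Int) → List (Int × Int)
  | 0, _, _, acc => acc
  | f + 1, point, start, acc =>
    let cur := pvG cloud point
    let start' := if (point = 0 ∧ cur ≠ 0) ∨ (pvG cloud (point - 1) = 0 ∧ cur ≠ 0)
                  then point else start
    if point = n - 1 ∧ cur ≠ 0 then acc ++ [(start', point)]          -- append, then break
    else if cur ≠ 0 ∧ pvG cloud (point + 1) = 0 then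
      pvALoop cloud n f (point + 1) start' (acc ++ [(start', point)])
    else
      pvALoop cloud n f (point + 1) start' acc

def segment_points (cloud : List Int) : List (Int × Int) :=
  pvALoop cloud (cloud.length : Int) cloud.length 0 0 []

-- ===== PORT B =====
-- the inner `while j + 1 < n and cloud[j + 1]` loop; fuel bounds the iterations
def pvRunEnd (cloud : List Int) (n : Int) : Nat → Int → Int
  | 0, j => j
  | f + 1, j =>
    if j + 1 < n ∧ pvG cloud (j + 1) ≠ 0 then pvRunEnd cloud n f (j + 1) else j

-- the outer `while i < n` loop; fuel bounds the iterations
def pvBLoop (cloud : List Int) (n : Int) : Nat → Int → List (Int × Int) → List (Int × Int)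
  | 0, _, acc => acc
  | f + 1, i, acc =>
    if i < n then
      if pvG cloud i = 0 then pvBLoop cloud n f (i + 1) acc
      else
        let j := pvRunEnd cloud n f i
        pvBLoop cloud n f (j + 1) (acc ++ [(i, j)])
    else acc

def segment_points_alt (cloud : List Int) : List (Int × Int) :=
  pvBLoop cloud (cloud.length : Int) cloud.length 0 []

-- ===== PRECONDITION & SPEC =====
def Spec_segment_points (cloud : List Int) (out : List (Int × Int)) : Prop := out = segment_points_alt cloud
instance (cloud : List Int) (out : List (Int × Int)) : Decidable (Spec_segment_points cloud out) := by unfold Spec_segment_points; infer_instance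

-- ===== CLAIM (what is proved, stated in full; the proofs are below) =====
def Claim_equal_segment_points : Prop := ∀ (cloud : List Int), Dom_segment_points cloud → Spec_segment_points cloud (segment_points cloud)

-- ===== LEMMAS AND PROOFS =====

-- out-of-range (to the right) reads give the default 0
theorem pvG_of_ge (cloud : List Int) (i : Int) (hi : (cloud.length : Int) ≤ i) :
    pvG cloud i = 0 := by
  have h : PySem.List.pyGet? cloud i = none := by
    simp [PySem.List.pyGet?_eq_none_iff, PySem.Raise.InRange]; omega
  simp [pvG, PySem.List.pyGetD, h]

theorem pvRunEnd_ge (cloud : List Int) (n : Int) :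
    ∀ (f : Nat) (j : Int), j ≤ pvRunEnd cloud n f j := by
  intro f
  induction f with
  | zero => intro j; simp [pvRunEnd]
  | succ f ih =>
    intro j
    by_cases h : j + 1 < n ∧ pvG cloud (j + 1) ≠ 0
    · have := ih (j + 1)
      simp only [pvRunEnd, if_pos h]
      omega
    · simp [pvRunEnd, h]

theorem pvRunEnd_stop (cloud : List Int) (n : Int) (f : Nat) (j : Int)
    (h : ¬ (j + 1 < n ∧ pvG cloud (j + 1) ≠ 0)) : pvRunEnd cloud n f j = j := by
  cases f with
  | zero => rfl
  | succ f => simp [pvRunEnd, h]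

theorem pvRunEnd_go (cloud : List Int) (n : Int) (f : Nat) (j : Int)
    (h1 : j + 1 < n) (h2 : pvG cloud (j + 1) ≠ 0) :
    pvRunEnd cloud n (f + 1) j = pvRunEnd cloud n f (j + 1) := by
  simp [pvRunEnd, h1, h2]

-- the inner loop's result does not depend on the fuel, as long as it suffices
theorem pvRunEnd_fuel (cloud : List Int) (n : Int) :
    ∀ (f1 f2 : Nat) (j : Int), (n - 1 - j).toNat ≤ f1 → (n - 1 - j).toNat ≤ f2 →
      pvRunEnd cloud n f1 j = pvRunEnd cloud n f2 j := by
  intro f1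
  induction f1 with
  | zero =>
    intro f2 j h1 h2
    have hs : ¬ (j + 1 < n ∧ pvG cloud (j + 1) ≠ 0) := fun hc => absurd hc.1 (by omega)
    rw [pvRunEnd_stop cloud n 0 j hs, pvRunEnd_stop cloud n f2 j hs]
  | succ f1 ih =>
    intro f2 j h1 h2
    by_cases hc : j + 1 < n ∧ pvG cloud (j + 1) ≠ 0
    · cases f2 with
      | zero => exact absurd hc.1 (by omega)
      | succ f2 =>
        rw [pvRunEnd_go cloud n f1 j hc.1 hc.2, pvRunEnd_go cloud n f2 j hc.1 hc.2]
        exact ih f2 (j + 1) (by omega) (by omega)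
    · rw [pvRunEnd_stop cloud n _ j hc, pvRunEnd_stop cloud n f2 j hc]

-- the outer loop's result does not depend on the fuel, as long as it suffices
theorem pvBLoop_fuel (cloud : List Int) (n : Int) :
    ∀ (f1 f2 : Nat) (i : Int) (acc : List (Int × Int)),
      (n - i).toNat ≤ f1 → (n - i).toNat ≤ f2 →
      pvBLoop cloud n f1 i acc = pvBLoop cloud n f2 i acc := by
  intro f1
  induction f1 with
  | zero =>
    intro f2 i acc h1 h2
    have hni : ¬ i < n := by omega
    cases f2 with
    | zero => rfl
    | succ f2 => simp [pvBLoop, hni]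
  | succ f1 ih =>
    intro f2 i acc h1 h2
    by_cases hni : i < n
    · cases f2 with
      | zero => omega
      | succ f2 =>
        by_cases hz : pvG cloud i = 0
        · simp only [pvBLoop, if_pos hni, if_pos hz]
          exact ih f2 (i + 1) acc (by omega) (by omega)
        · simp only [pvBLoop, if_pos hni, if_neg hz]
          rw [pvRunEnd_fuel cloud n f1 f2 i (by omega) (by omega)]
          have hge := pvRunEnd_ge cloud n f2 i
          exact ih f2 (pvRunEnd cloud n f2 i + 1)
            (acc ++ [(i, pvRunEnd cloud n f2 i)]) (by omega) (by omega)
    · cases f2 with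
      | zero => simp [pvBLoop, hni]
      | succ f2 => simp [pvBLoop, hni]

-- Bridge: A's loop from any point equals B's loop, where "currently inside a run"
-- (point > 0, previous and current readings nonzero) means B has already emitted up to
-- the run's recorded start and will close the run at its end.
theorem pvBridge (cloud : List Int) :
    ∀ (f : Nat) (point start : Int) (acc : List (Int × Int)),
      (f : Int) = (cloud.length : Int) - point → 0 ≤ point →
      pvALoop cloud (cloud.length : Int) f point start acc =
        (if 0 < point ∧ pvG cloud (point - 1) ≠ 0 ∧ pvG cloud point ≠ 0 then
          pvBLoop cloud (cloud.length : Int) f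
            (pvRunEnd cloud (cloud.length : Int) f point + 1)
            (acc ++ [(start, pvRunEnd cloud (cloud.length : Int) f point)])
        else pvBLoop cloud (cloud.length : Int) f point acc) := by
  intro f
  induction f with
  | zero =>
    intro point start acc hf hp
    have hg0 : pvG cloud point = 0 := pvG_of_ge cloud point (by omega)
    have hRf : ¬ (0 < point ∧ pvG cloud (point - 1) ≠ 0 ∧ pvG cloud point ≠ 0) := by
      simp [hg0]
    rw [if_neg hRf]
    rfl
  | succ f ih =>
    intro point start acc hf hp
    have hlt : point < (cloud.length : Int) := by omega
    by_cases hcur : pvG cloud point = 0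
    · -- current reading zero: both loops just advance
      have hc1 : ¬ ((point = 0 ∧ pvG cloud point ≠ 0) ∨
          (pvG cloud (point - 1) = 0 ∧ pvG cloud point ≠ 0)) := by simp [hcur]
      have hc2 : ¬ (point = (cloud.length : Int) - 1 ∧ pvG cloud point ≠ 0) := by
        simp [hcur]
      have hc3 : ¬ (pvG cloud point ≠ 0 ∧ pvG cloud (point + 1) = 0) := by simp [hcur]
      have hR : ¬ (0 < point ∧ pvG cloud (point - 1) ≠ 0 ∧ pvG cloud point ≠ 0) := by
        simp [hcur]
      have hR' : ¬ (0 < point + 1 ∧ pvG cloud (point + 1 - 1) ≠ 0 ∧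
          pvG cloud (point + 1) ≠ 0) := by simp [add_sub_cancel_right, hcur]
      simp only [pvALoop, if_neg hc1, if_neg hc2, if_neg hc3]
      rw [ih (point + 1) start acc (by omega) (by omega), if_neg hR', if_neg hR]
      simp [pvBLoop, hlt, hcur]
    · by_cases hin : 0 < point ∧ pvG cloud (point - 1) ≠ 0
      · -- continuing a run recorded at `start`
        have hc1 : ¬ ((point = 0 ∧ pvG cloud point ≠ 0) ∨
            (pvG cloud (point - 1) = 0 ∧ pvG cloud point ≠ 0)) := by
          simp [hin.2, show ¬ point = 0 by omega]
        have hR : 0 < point ∧ pvG cloud (point - 1) ≠ 0 ∧ pvG cloud point ≠ 0 :=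
          ⟨hin.1, hin.2, hcur⟩
        by_cases hlast : point = (cloud.length : Int) - 1
        · -- last index: A appends and breaks; B's inner loop stops here
          have hf0 : f = 0 := by omega
          subst hf0
          have hstop : ¬ (point + 1 < (cloud.length : Int) ∧
              pvG cloud (point + 1) ≠ 0) := fun hc => absurd hc.1 (by omega)
          have hc2p : point = (cloud.length : Int) - 1 ∧ pvG cloud point ≠ 0 :=
            ⟨hlast, hcur⟩
          simp only [pvALoop, if_neg hc1, if_pos hc2p]
          rw [if_pos hR, pvRunEnd_stop cloud _ 1 point hstop]
          simp [pvBLoop, show ¬ point + 1 < (cloud.length : Int) by omega]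
        · have hc2 : ¬ (point = (cloud.length : Int) - 1 ∧ pvG cloud point ≠ 0) := by
            simp [hlast]
          by_cases hnext : pvG cloud (point + 1) = 0
          · -- run ends here: A appends, B's inner loop stops here
            have hc3p : pvG cloud point ≠ 0 ∧ pvG cloud (point + 1) = 0 := ⟨hcur, hnext⟩
            have hR' : ¬ (0 < point + 1 ∧ pvG cloud (point + 1 - 1) ≠ 0 ∧
                pvG cloud (point + 1) ≠ 0) := by simp [hnext]
            have hstop : ¬ (point + 1 < (cloud.length : Int) ∧
                pvG cloud (point + 1) ≠ 0) := fun hc => hc.2 hnext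
            simp only [pvALoop, if_neg hc1, if_neg hc2, if_pos hc3p]
            rw [ih (point + 1) start (acc ++ [(start, point)]) (by omega) (by omega)]
            rw [if_neg hR', if_pos hR, pvRunEnd_stop cloud _ (f + 1) point hstop]
            exact pvBLoop_fuel cloud _ f (f + 1) (point + 1) _ (by omega) (by omega)
          · -- run continues
            have hp1 : point + 1 < (cloud.length : Int) := by
              by_contra hc
              exact hnext (pvG_of_ge cloud (point + 1) (by omega))
            have hc3 : ¬ (pvG cloud point ≠ 0 ∧ pvG cloud (point + 1) = 0) := by
              simp [hnext]
            have hR' : 0 < point + 1 ∧ pvG cloud (point + 1 - 1) ≠ 0 ∧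
                pvG cloud (point + 1) ≠ 0 := by
              refine ⟨by omega, ?_, hnext⟩
              simpa [add_sub_cancel_right] using hcur
            simp only [pvALoop, if_neg hc1, if_neg hc2, if_neg hc3]
            rw [ih (point + 1) start acc (by omega) (by omega)]
            rw [if_pos hR', if_pos hR, pvRunEnd_go cloud _ f point hp1 hnext]
            have hge := pvRunEnd_ge cloud (cloud.length : Int) f (point + 1)
            exact pvBLoop_fuel cloud _ f (f + 1)
              (pvRunEnd cloud (cloud.length : Int) f (point + 1) + 1) _
              (by omega) (by omega)
      · -- start of a run: A records start' = point; B enters its inner loop at point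
        have hc1 : (point = 0 ∧ pvG cloud point ≠ 0) ∨
            (pvG cloud (point - 1) = 0 ∧ pvG cloud point ≠ 0) := by
          by_cases hpt : point = 0
          · exact Or.inl ⟨hpt, hcur⟩
          · have hpr : pvG cloud (point - 1) = 0 := by
              by_contra hpr; exact hin ⟨by omega, hpr⟩
            exact Or.inr ⟨hpr, hcur⟩
        have hR : ¬ (0 < point ∧ pvG cloud (point - 1) ≠ 0 ∧ pvG cloud point ≠ 0) :=
          fun hc => hin ⟨hc.1, hc.2.1⟩
        by_cases hlast : point = (cloud.length : Int) - 1
        · have hf0 : f = 0 := by omega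
          subst hf0
          have hc2p : point = (cloud.length : Int) - 1 ∧ pvG cloud point ≠ 0 :=
            ⟨hlast, hcur⟩
          simp only [pvALoop, if_pos hc1, if_pos hc2p]
          rw [if_neg hR]
          simp [pvBLoop, hlt, hcur, pvRunEnd]
        · have hc2 : ¬ (point = (cloud.length : Int) - 1 ∧ pvG cloud point ≠ 0) := by
            simp [hlast]
          by_cases hnext : pvG cloud (point + 1) = 0
          · have hc3p : pvG cloud point ≠ 0 ∧ pvG cloud (point + 1) = 0 := ⟨hcur, hnext⟩
            have hR' : ¬ (0 < point + 1 ∧ pvG cloud (point + 1 - 1) ≠ 0 ∧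
                pvG cloud (point + 1) ≠ 0) := by simp [hnext]
            have hstop : ¬ (point + 1 < (cloud.length : Int) ∧
                pvG cloud (point + 1) ≠ 0) := fun hc => hc.2 hnext
            simp only [pvALoop, if_pos hc1, if_neg hc2, if_pos hc3p]
            rw [ih (point + 1) point (acc ++ [(point, point)]) (by omega) (by omega)]
            rw [if_neg hR', if_neg hR]
            simp only [pvBLoop, if_pos hlt, if_neg hcur]
            rw [pvRunEnd_stop cloud _ f point hstop]
          · have hp1 : point + 1 < (cloud.length : Int) := by
              by_contra hc
              exact hnext (pvG_of_ge cloud (point + 1) (by omega))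
            have hc3 : ¬ (pvG cloud point ≠ 0 ∧ pvG cloud (point + 1) = 0) := by
              simp [hnext]
            have hR' : 0 < point + 1 ∧ pvG cloud (point + 1 - 1) ≠ 0 ∧
                pvG cloud (point + 1) ≠ 0 := by
              refine ⟨by omega, ?_, hnext⟩
              simpa [add_sub_cancel_right] using hcur
            have hrr : pvRunEnd cloud (cloud.length : Int) f point =
                pvRunEnd cloud (cloud.length : Int) f (point + 1) := by
              cases f with
              | zero => omega
              | succ f' =>
                rw [pvRunEnd_go cloud _ f' point hp1 hnext]
                exact pvRunEnd_fuel cloud _ f' (f' + 1) (point + 1) (by omega) (by omega)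
            simp only [pvALoop, if_pos hc1, if_neg hc2, if_neg hc3]
            rw [ih (point + 1) point acc (by omega) (by omega)]
            rw [if_pos hR', if_neg hR]
            simp only [pvBLoop, if_pos hlt, if_neg hcur]
            rw [hrr]

-- ===== VERDICT (by name: the statement is the Claim_ definition above) =====
theorem segment_points_spec : Claim_equal_segment_points := by
  intro cloud _
  unfold Spec_segment_points segment_points segment_points_alt
  rw [pvBridge cloud cloud.length 0 0 [] (by omega) (le_refl 0)]
  rw [if_neg (by simp)]
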